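-- pv_equiv track=rewrite | github.com/studioatable/geopolitique-dashboard | ingestion/naturalearth.py | pick_property
-- ===== SOURCE A (Python) =====
-- from typing import Optional
--
-- def pick_property(props: dict, candidates: list[str]) -> Optional[str]:
--     """Cherche la première propriété disponible (case-insensitive) parmi
--     les candidats. Natural Earth utilise selon les versions ADMIN, NAME,
--     name, sov_a3, etc."""
--     lc_props = {k.lower(): v for k, v in props.items()}
--     for candidate in candidates:
--         if candidate.lower() in lc_props:
--             value = lc_props[candidate.lower()]
--             if value not in (None, "", "-99"):
--                 return value
--     return None
-- ===== SOURCE B (Python) =====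
-- def pick_property(props: dict, candidates):
--     """Inverted traversal: index the candidates by lowercased name (first
--     occurrence keeps its rank), make ONE pass over the properties recording
--     each value under the rank of its candidate, then return the value of the
--     best (lowest) rank that is usable."""
--     rank = {}
--     for i, c in enumerate(candidates):
--         rank.setdefault(c.lower(), i)
--     slot = {}
--     for k, v in props.items():
--         i = rank.get(k.lower())
--         if i is not None:
--             slot[i] = v
--     for i in range(len(candidates)):
--         if i in slot and slot[i] not in (None, "", "-99"):
--             return slot[i]
--     return None
-- ===== Notes on version B (the rewrite author's own statement) =====
-- stated objective: alternative
-- what changed: B inverts the traversal: it ranks candidates by lowercased name (first occurrence wins), makes one pass over the properties filling a rank-indexed slot table, then returns the lowest-ranked usable value, instead of A's candidate-major lookup into a prebuilt lowercased dict.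
import Mathlib
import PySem

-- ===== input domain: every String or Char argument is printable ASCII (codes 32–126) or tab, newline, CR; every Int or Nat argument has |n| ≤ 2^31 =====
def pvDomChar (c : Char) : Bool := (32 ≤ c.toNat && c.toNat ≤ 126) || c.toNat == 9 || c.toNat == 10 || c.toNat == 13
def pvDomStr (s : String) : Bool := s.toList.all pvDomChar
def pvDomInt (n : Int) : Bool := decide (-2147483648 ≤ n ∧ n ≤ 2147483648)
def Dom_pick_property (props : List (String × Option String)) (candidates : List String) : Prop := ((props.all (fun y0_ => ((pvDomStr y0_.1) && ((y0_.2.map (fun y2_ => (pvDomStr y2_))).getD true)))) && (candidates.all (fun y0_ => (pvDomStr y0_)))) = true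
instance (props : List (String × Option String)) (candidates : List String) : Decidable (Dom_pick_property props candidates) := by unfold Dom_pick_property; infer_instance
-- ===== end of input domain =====

-- B inverts the traversal (rank candidates once, one pass over the properties into a
-- rank-indexed slot table, pick the lowest usable rank) instead of A's candidate-major
-- lookup in a prebuilt lowercased dict; alternative algorithm, same results.


-- ===== PORT A =====
-- lc_props = {k.lower(): v for k, v in props.items()}
def pickA_dict (props : List (String × Option String)) : PySem.Dict String (Option String) :=
  props.foldl (fun d p => d.insert (PySem.Str.lower p.1) p.2) PySem.Dict.empty

-- the 'for candidate in candidates' loop; 'candidate.lower() in lc_props' and the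
-- lookup are fused into one get? match (contains ↔ get? = some, exact)
def pickA_go (d : PySem.Dict String (Option String)) : List String → Option String
  | [] => none
  | c :: rest =>
    match d.get? (PySem.Str.lower c) with
    | some value =>
      if value ∉ ([none, some "", some "-99"] : List (Option String)) then value
      else pickA_go d rest
    | none => pickA_go d rest

def pick_property (props : List (String × Option String)) (candidates : List String) : Option String :=
  pickA_go (pickA_dict props) candidates

-- ===== PORT B =====
-- rank = {}; for i, c in enumerate(candidates): rank.setdefault(c.lower(), i)
def pickB_rank (candidates : List String) : PySem.Dict String Int :=
  (PySem.List.enumerate candidates).foldl (fun d ic => d.setdefault (PySem.Str.lower ic.2) ic.1) PySem.Dict.empty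

-- slot = {}; for k, v in props.items(): i = rank.get(k.lower()); if i is not None: slot[i] = v
def pickB_slot (rank : PySem.Dict String Int) (props : List (String × Option String)) : PySem.Dict Int (Option String) :=
  props.foldl (fun s p =>
    match rank.get? (PySem.Str.lower p.1) with
    | some i => s.insert i p.2
    | none => s) PySem.Dict.empty

-- for i in range(len(candidates)): if i in slot and slot[i] not in (None, "", "-99"): return slot[i]
def pickB_sel (slot : PySem.Dict Int (Option String)) : List Int → Option String
  | [] => none
  | i :: rest =>
    match slot.get? i with
    | some v => if v ∉ ([none, some "", some "-99"] : List (Option String)) then v else pickB_sel slot rest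
    | none => pickB_sel slot rest

def pick_property_alt (props : List (String × Option String)) (candidates : List String) : Option String :=
  pickB_sel (pickB_slot (pickB_rank candidates) props) (PySem.List.pyRange 0 (PySem.List.len candidates) 1)

-- ===== PRECONDITION & SPEC =====
def Spec_pick_property (props : List (String × Option String)) (candidates : List String) (out : Option String) : Prop := out = pick_property_alt props candidates
instance (props : List (String × Option String)) (candidates : List String) (out : Option String) : Decidable (Spec_pick_property props candidates out) := by unfold Spec_pick_property; infer_instance

-- ===== CLAIM (what is proved, stated in full; the proofs are below) =====
def Claim_equal_pick_property : Prop := ∀ (props : List (String × Option String)) (candidates : List String), Dom_pick_property props candidates → Spec_pick_property props candidates (pick_property props candidates)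

-- ===== LEMMAS AND PROOFS =====

-- value of the LAST property whose lowered key is x (the dict-comprehension collapse)
def lastMatch (props : List (String × Option String)) (x : String) (o : Option (Option String)) : Option (Option String) :=
  props.foldl (fun o p => if PySem.Str.lower p.1 == x then some p.2 else o) o

-- A's loop with the dict lookup replaced by lastMatch
def fA (props : List (String × Option String)) : List String → Option String
  | [] => none
  | c :: rest =>
    match lastMatch props (PySem.Str.lower c) none with
    | some w => if w ∉ ([none, some "", some "-99"] : List (Option String)) then w else fA props rest
    | none => fA props rest

-- index of the first candidate (counting from j) whose lowered form is x
def firstIdxFrom (j : Int) (x : String) : List String → Option Int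
  | [] => none
  | c :: r => if PySem.Str.lower c = x then some j else firstIdxFrom (j + 1) x r

theorem dict_get?_eq_lastMatch (props : List (String × Option String)) (d : PySem.Dict String (Option String)) (x : String) :
    (props.foldl (fun d p => d.insert (PySem.Str.lower p.1) p.2) d).get? x = lastMatch props x (d.get? x) := by
  induction props generalizing d with
  | nil => rfl
  | cons p rest ih =>
    rw [List.foldl_cons, ih]
    show lastMatch rest x ((d.insert (PySem.Str.lower p.1) p.2).get? x)
        = lastMatch rest x (if (PySem.Str.lower p.1 == x) = true then some p.2 else d.get? x)
    congr 1
    rw [PySem.Dict.get?_insert]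
    by_cases h : PySem.Str.lower p.1 = x
    · simp [h]
    · simp [h, Ne.symm h]

theorem pickA_eq_fA (props : List (String × Option String)) (cs : List String) :
    pickA_go (pickA_dict props) cs = fA props cs := by
  induction cs with
  | nil => rfl
  | cons c rest ih =>
    have hd : (pickA_dict props).get? (PySem.Str.lower c) = lastMatch props (PySem.Str.lower c) none := by
      have := dict_get?_eq_lastMatch props PySem.Dict.empty (PySem.Str.lower c)
      simpa [pickA_dict, PySem.Dict.get?_empty] using this
    simp only [pickA_go, fA, hd, ih]

-- the rank dict is first-occurrence indexing
theorem rank_fold_get? (cs : List String) (x : String) :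
    ∀ (j : Int) (d : PySem.Dict String Int),
    ((PySem.List.enumerate cs j).foldl (fun d ic => d.setdefault (PySem.Str.lower ic.2) ic.1) d).get? x
      = match d.get? x with | some v => some v | none => firstIdxFrom j x cs := by
  induction cs with
  | nil => intro j d; cases hd : d.get? x <;> simp [PySem.List.enumerate_nil, hd, firstIdxFrom]
  | cons c r ih =>
    intro j d
    rw [PySem.List.enumerate_cons, List.foldl_cons]
    dsimp only
    rw [ih]
    by_cases h : PySem.Str.lower c = x
    · rw [h, PySem.Dict.get?_setdefault_self]
      cases d.get? x with
      | some v => simp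
      | none => simp [firstIdxFrom, h]
    · rw [PySem.Dict.get?_setdefault_of_ne d j (Ne.symm h)]
      cases d.get? x with
      | some v => simp
      | none => simp [firstIdxFrom, h]

theorem rank_get? (cs : List String) (x : String) :
    (pickB_rank cs).get? x = firstIdxFrom 0 x cs := by
  have := rank_fold_get? cs x 0 PySem.Dict.empty
  simpa [pickB_rank, PySem.Dict.get?_empty] using this

theorem firstIdxFrom_sound (x : String) :
    ∀ (cs : List String) (j i : Int), firstIdxFrom j x cs = some i →
      ∃ k : Nat, ∃ hk : k < cs.length, i = j + k ∧ PySem.Str.lower cs[k] = x := by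
  intro cs
  induction cs with
  | nil => intro j i h; simp [firstIdxFrom] at h
  | cons c r ih =>
    intro j i h
    by_cases hc : PySem.Str.lower c = x
    · refine ⟨0, by simp, ?_, by simpa using hc⟩
      simp [firstIdxFrom, hc] at h
      omega
    · rw [firstIdxFrom, if_neg hc] at h
      obtain ⟨k, hk, hi, hx⟩ := ih (j + 1) i h
      exact ⟨k + 1, by simpa using hk, by omega, by simpa using hx⟩

theorem firstIdxFrom_append (x : String) (pre cs : List String) (j : Int) :
    firstIdxFrom j x (pre ++ cs)
      = match firstIdxFrom j x pre with
        | some i => some i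
        | none => firstIdxFrom (j + pre.length) x cs := by
  induction pre generalizing j with
  | nil => simp [firstIdxFrom]
  | cons c r ih =>
    by_cases hc : PySem.Str.lower c = x
    · simp [firstIdxFrom, hc]
    · rw [List.cons_append, firstIdxFrom, if_neg hc, firstIdxFrom, if_neg hc, ih]
      have hl : j + 1 + (r.length : Int) = j + ((c :: r).length : Int) := by
        simp only [List.length_cons]; push_cast; ring
      rw [hl]

theorem firstIdxFrom_of_not_mem (x : String) (pre : List String)
    (h : x ∉ pre.map (fun s => PySem.Str.lower s)) (j : Int) :
    firstIdxFrom j x pre = none := by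
  induction pre generalizing j with
  | nil => rfl
  | cons c r ih =>
    simp only [List.map_cons, List.mem_cons, not_or] at h
    rw [firstIdxFrom, if_neg (fun he => h.1 he.symm), ih h.2]

theorem firstIdxFrom_of_mem (x : String) (pre : List String)
    (h : x ∈ pre.map (fun s => PySem.Str.lower s)) (j : Int) :
    ∃ i, firstIdxFrom j x pre = some i := by
  induction pre generalizing j with
  | nil => simp at h
  | cons c r ih =>
    by_cases hc : PySem.Str.lower c = x
    · exact ⟨j, by rw [firstIdxFrom, if_pos hc]⟩
    · have : x ∈ r.map (fun s => PySem.Str.lower s) := by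
        rcases by simpa using h with h' | h'
        · exact absurd h'.symm hc
        · simpa using h'
      obtain ⟨i, hi⟩ := ih this (j + 1)
      exact ⟨i, by rw [firstIdxFrom, if_neg hc, hi]⟩

-- the per-index content of the slot dict as a fold
theorem slot_get? (rank : PySem.Dict String Int) (props : List (String × Option String)) (i : Int) :
    ∀ s0 : PySem.Dict Int (Option String),
    (props.foldl (fun s p =>
      match rank.get? (PySem.Str.lower p.1) with
      | some i' => s.insert i' p.2
      | none => s) s0).get? i
      = props.foldl (fun o p => if rank.get? (PySem.Str.lower p.1) == some i then some p.2 else o) (s0.get? i) := by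
  induction props with
  | nil => intro s0; rfl
  | cons p r ih =>
    intro s0
    rw [List.foldl_cons, List.foldl_cons, ih]
    congr 1
    cases rank.get? (PySem.Str.lower p.1) with
    | none => simp
    | some i' =>
      rw [PySem.Dict.get?_insert]
      by_cases h : i = i'
      · simp [h]
      · simp [h, Ne.symm h]

theorem fold_if_none {α : Type} (cond : α → Bool) (val : α → Option String) (l : List α)
    (h : ∀ p ∈ l, cond p = false) :
    l.foldl (fun o p => if cond p then some (val p) else o) none = none := by
  induction l with
  | nil => rfl
  | cons p r ih =>
    rw [List.foldl_cons, if_neg (by simp [h p (by simp)]), ih (fun q hq => h q (by simp [hq]))]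

-- ===== the main induction: A's candidate loop = B's rank loop =====
theorem main_loop (props : List (String × Option String)) :
    ∀ (cs pre : List String),
    (∀ x ∈ pre.map (fun s => PySem.Str.lower s), ∀ w, lastMatch props x none = some w →
        w ∈ ([none, some "", some "-99"] : List (Option String))) →
    fA props cs
      = pickB_sel (pickB_slot (pickB_rank (pre ++ cs)) props)
          (PySem.List.pyRange (pre.length : Int) ((pre.length : Int) + (cs.length : Int)) 1) := by
  intro cs
  induction cs with
  | nil =>
    intro pre _
    rw [show ((pre.length : Int) + ((List.nil (α := String)).length : Int)) = (pre.length : Int) by simp,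
        PySem.List.pyRange_one_eq_nil (le_refl _)]
    rfl
  | cons c r ih =>
    intro pre hinv
    have hjlt : (pre.length : Int) < (pre.length : Int) + ((c :: r).length : Int) := by
      simp only [List.length_cons]; push_cast; omega
    rw [PySem.List.pyRange_one_cons hjlt]
    have hslot : ∀ i : Int,
        (pickB_slot (pickB_rank (pre ++ c :: r)) props).get? i
          = props.foldl (fun o p =>
              if (pickB_rank (pre ++ c :: r)).get? (PySem.Str.lower p.1) == some i then some p.2 else o) none := by
      intro i
      have := slot_get? (pickB_rank (pre ++ c :: r)) props i PySem.Dict.empty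
      simpa [pickB_slot, PySem.Dict.get?_empty] using this
    -- any key ranked at pre.length must be (a case-duplicate of) c
    have hrankj : ∀ y : String,
        (pickB_rank (pre ++ c :: r)).get? y = some (pre.length : Int) → y = PySem.Str.lower c := by
      intro y hy
      rw [rank_get? (pre ++ c :: r) y] at hy
      obtain ⟨k, hk, hik, hx⟩ := firstIdxFrom_sound y (pre ++ c :: r) 0 (pre.length : Int) hy
      have hkk : k = pre.length := by omega
      subst hkk
      rw [List.getElem_append_right (le_refl pre.length)] at hx
      simpa using hx.symm
    by_cases hmem : PySem.Str.lower c ∈ pre.map (fun s => PySem.Str.lower s)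
    · -- c is a case-duplicate of an earlier candidate: rank never points at pre.length,
      -- the slot has no entry there, and A's value for c is bad by the invariant
      have hrc : ∀ p ∈ props,
          ((pickB_rank (pre ++ c :: r)).get? (PySem.Str.lower p.1) == some (pre.length : Int)) = false := by
        intro p _
        apply beq_false_of_ne
        intro hy
        have hlc := hrankj _ hy
        rw [hlc, rank_get? (pre ++ c :: r) (PySem.Str.lower c),
            firstIdxFrom_append (PySem.Str.lower c) pre (c :: r) 0] at hy
        obtain ⟨i0, hi0⟩ := firstIdxFrom_of_mem (PySem.Str.lower c) pre hmem 0
        rw [hi0] at hy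
        obtain ⟨k, hk, hik, _⟩ := firstIdxFrom_sound (PySem.Str.lower c) pre 0 i0 hi0
        have : i0 = (pre.length : Int) := by exact Option.some.inj hy
        omega
      have hnone : (pickB_slot (pickB_rank (pre ++ c :: r)) props).get? (pre.length : Int) = none := by
        rw [hslot]
        exact fold_if_none _ (fun p => p.2) props hrc
      rw [pickB_sel, hnone]
      have hA : fA props (c :: r) = fA props r := by
        rw [fA]
        cases hL : lastMatch props (PySem.Str.lower c) none with
        | none => rfl
        | some w =>
          have hw := hinv (PySem.Str.lower c) hmem w hL
          simp [hw]
      rw [hA]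
      have hinv' : ∀ x ∈ (pre ++ [c]).map (fun s => PySem.Str.lower s), ∀ w,
          lastMatch props x none = some w →
          w ∈ ([none, some "", some "-99"] : List (Option String)) := by
        intro x hx w hw
        rcases by simpa using hx with hx' | hx'
        · exact hinv x (by simpa using hx') w hw
        · exact hinv x (by rw [hx']; exact hmem) w hw
      have ihr := ih (pre ++ [c]) hinv'
      rw [show (pre ++ [c]) ++ r = pre ++ c :: r by simp,
          show (((pre ++ [c]).length : Int)) = (pre.length : Int) + 1 by simp,
          show (pre.length : Int) + 1 + (r.length : Int)
              = (pre.length : Int) + ((c :: r).length : Int) by simp; ring] at ihr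
      exact ihr
    · -- c's lowered form is new: it is ranked exactly at pre.length,
      -- and the slot there carries exactly A's last-match value for c
      have hrc : (pickB_rank (pre ++ c :: r)).get? (PySem.Str.lower c) = some (pre.length : Int) := by
        rw [rank_get? (pre ++ c :: r) (PySem.Str.lower c),
            firstIdxFrom_append (PySem.Str.lower c) pre (c :: r) 0,
            firstIdxFrom_of_not_mem (PySem.Str.lower c) pre hmem 0]
        simp [firstIdxFrom]
      have hcond : ∀ p : String × Option String,
          ((pickB_rank (pre ++ c :: r)).get? (PySem.Str.lower p.1) == some (pre.length : Int))
            = (PySem.Str.lower p.1 == PySem.Str.lower c) := by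
        intro p
        by_cases hc : PySem.Str.lower p.1 = PySem.Str.lower c
        · rw [hc, hrc]; simp
        · have : (pickB_rank (pre ++ c :: r)).get? (PySem.Str.lower p.1) ≠ some (pre.length : Int) :=
            fun hy => hc (hrankj _ hy)
          simp [this, hc]
      have hgetj : (pickB_slot (pickB_rank (pre ++ c :: r)) props).get? (pre.length : Int)
          = lastMatch props (PySem.Str.lower c) none := by
        rw [hslot, lastMatch]
        congr 1
        funext o p
        rw [hcond p]
      rw [pickB_sel, hgetj, fA]
      cases hL : lastMatch props (PySem.Str.lower c) none with
      | none =>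
        have hinv' : ∀ x ∈ (pre ++ [c]).map (fun s => PySem.Str.lower s), ∀ w,
            lastMatch props x none = some w →
            w ∈ ([none, some "", some "-99"] : List (Option String)) := by
          intro x hx w hw
          rcases by simpa using hx with hx' | hx'
          · exact hinv x (by simpa using hx') w hw
          · rw [hx', hL] at hw; cases hw
        have ihr := ih (pre ++ [c]) hinv'
        rw [show (pre ++ [c]) ++ r = pre ++ c :: r by simp,
            show (((pre ++ [c]).length : Int)) = (pre.length : Int) + 1 by simp,
            show (pre.length : Int) + 1 + (r.length : Int)
                = (pre.length : Int) + ((c :: r).length : Int) by simp; ring] at ihr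
        exact ihr
      | some w =>
        dsimp only
        by_cases hw : w ∈ ([none, some "", some "-99"] : List (Option String))
        · rw [if_neg (not_not_intro hw), if_neg (not_not_intro hw)]
          have hinv' : ∀ x ∈ (pre ++ [c]).map (fun s => PySem.Str.lower s), ∀ w',
              lastMatch props x none = some w' →
              w' ∈ ([none, some "", some "-99"] : List (Option String)) := by
            intro x hx w' hw'
            rcases by simpa using hx with hx' | hx'
            · exact hinv x (by simpa using hx') w' hw'
            · rw [hx', hL] at hw'
              rw [← Option.some.inj hw']
              exact hw
          have ihr := ih (pre ++ [c]) hinv'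
          rw [show (pre ++ [c]) ++ r = pre ++ c :: r by simp,
              show (((pre ++ [c]).length : Int)) = (pre.length : Int) + 1 by simp,
              show (pre.length : Int) + 1 + (r.length : Int)
                  = (pre.length : Int) + ((c :: r).length : Int) by simp; ring] at ihr
          exact ihr
        · rw [if_pos hw, if_pos hw]

-- ===== VERDICT (by name: the statement is the Claim_ definition above) =====
theorem pick_property_spec : Claim_equal_pick_property := by
  intro props candidates _
  show pick_property props candidates = pick_property_alt props candidates
  have h := main_loop props candidates [] (by simp)
  simpa [pick_property, pick_property_alt, pickA_eq_fA, PySem.List.len_eq] using h
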